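-- pv_equiv track=rewrite | github.com/pypi-data/pypi-mirror-178 | packages/scheduleplus/scheduleplus-0.1.2.tar.gz/scheduleplus-0.1.2/src/scheduleplus/cronparser.py | _replace_month_day
-- ===== SOURCE A (Python) =====
-- ISODAYS = {
--     "mon": 0,
--     "tue": 1,
--     "wed": 2,
--     "thu": 3,
--     "fri": 4,
--     "sat": 5,
--     "sun": 6,
-- }
--
-- MONTHS = {
--     "jan": 1,
--     "feb": 2,
--     "mar": 3,
--     "apr": 4,
--     "may": 5,
--     "jun": 6,
--     "jul": 7,
--     "aug": 8,
--     "sep": 9,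
--     "oct": 10,
--     "nov": 11,
--     "dec": 12,
-- }
--
-- def _replace_month_day(part_str: str, part_index: int):
--     part_str = part_str.lower()
--     if part_index == 4:
--         for index, day in enumerate(ISODAYS):
--             part_str = part_str.replace(day, str(index))
--     elif part_index == 3:
--         for index, month in enumerate(MONTHS):
--             part_str = part_str.replace(month, str(index + 1))
--     return part_str
-- ===== SOURCE B (Python) =====
-- _DAY_REPL = {"mon": "0", "tue": "1", "wed": "2", "thu": "3",
--              "fri": "4", "sat": "5", "sun": "6"}
--
-- _MONTH_REPL = {"jan": "1", "feb": "2", "mar": "3", "apr": "4",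
--                "may": "5", "jun": "6", "jul": "7", "aug": "8",
--                "sep": "9", "oct": "10", "nov": "11", "dec": "12"}
--
--
-- def _replace_month_day(part_str: str, part_index: int):
--     s = part_str.lower()
--     if part_index == 4:
--         table = _DAY_REPL
--     elif part_index == 3:
--         table = _MONTH_REPL
--     else:
--         return s
--     out = []
--     i = 0
--     while i < len(s):
--         rep = table.get(s[i:i + 3])
--         if rep is not None:
--             out.append(rep)
--             i += 3
--         else:
--             out.append(s[i])
--             i += 1
--     return "".join(out)
-- ===== Notes on version B (the rewrite author's own statement) =====
-- stated objective: alternative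
-- what changed: Instead of 7 (days) / 12 (months) sequential full-string .replace passes, B makes a single left-to-right scan over the lowercased string, looking each 3-character window up in a precomputed name->number dict (one pass instead of k passes; not measurably faster in Python, where .replace runs in C).
-- outside the precondition, e.g. on _replace_month_day('satue', 4): A returns 'sa1', B returns '5ue'; on _replace_month_day('sathu', 4): A returns 'sa3', B returns '5hu'
import Mathlib
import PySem

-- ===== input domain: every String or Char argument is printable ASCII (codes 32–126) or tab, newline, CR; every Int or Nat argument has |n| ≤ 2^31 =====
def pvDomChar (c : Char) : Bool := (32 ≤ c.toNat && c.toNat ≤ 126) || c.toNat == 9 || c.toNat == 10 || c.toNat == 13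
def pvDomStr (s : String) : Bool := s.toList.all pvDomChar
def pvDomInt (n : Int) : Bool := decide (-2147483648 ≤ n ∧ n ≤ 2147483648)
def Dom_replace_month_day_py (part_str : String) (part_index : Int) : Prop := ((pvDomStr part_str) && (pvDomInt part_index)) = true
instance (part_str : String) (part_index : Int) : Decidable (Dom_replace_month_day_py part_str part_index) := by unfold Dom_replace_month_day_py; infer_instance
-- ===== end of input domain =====

-- B replaces the 7/12 sequential full-string .replace passes by ONE left-to-right scan with a
-- name->number table lookup on each 3-char window (objective: alternative single-pass algorithm).

-- ===== PORT A =====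
-- module constants ISODAYS / MONTHS (dicts name -> number; A only iterates their keys)
def pvISODAYS : PySem.Dict String Int :=
  ⟨[("mon", 0), ("tue", 1), ("wed", 2), ("thu", 3), ("fri", 4), ("sat", 5), ("sun", 6)]⟩
def pvMONTHS : PySem.Dict String Int :=
  ⟨[("jan", 1), ("feb", 2), ("mar", 3), ("apr", 4), ("may", 5), ("jun", 6), ("jul", 7),
    ("aug", 8), ("sep", 9), ("oct", 10), ("nov", 11), ("dec", 12)]⟩

def replace_month_day_py (part_str : String) (part_index : Int) : String :=
  let s := PySem.Str.lower part_str
  if part_index = 4 then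
    (PySem.List.enumerate pvISODAYS.keys).foldl
      (fun acc p => PySem.Str.replace acc p.2 (PySem.Int.toStr p.1)) s
  else if part_index = 3 then
    (PySem.List.enumerate pvMONTHS.keys).foldl
      (fun acc p => PySem.Str.replace acc p.2 (PySem.Int.toStr (p.1 + 1))) s
  else s

-- ===== PORT B =====
-- module constants _DAY_REPL / _MONTH_REPL of Source B (name -> replacement string)
def pvDayRepl : PySem.Dict (List Char) (List Char) :=
  ⟨[("mon".toList, "0".toList), ("tue".toList, "1".toList), ("wed".toList, "2".toList),
    ("thu".toList, "3".toList), ("fri".toList, "4".toList), ("sat".toList, "5".toList),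
    ("sun".toList, "6".toList)]⟩
def pvMonthRepl : PySem.Dict (List Char) (List Char) :=
  ⟨[("jan".toList, "1".toList), ("feb".toList, "2".toList), ("mar".toList, "3".toList),
    ("apr".toList, "4".toList), ("may".toList, "5".toList), ("jun".toList, "6".toList),
    ("jul".toList, "7".toList), ("aug".toList, "8".toList), ("sep".toList, "9".toList),
    ("oct".toList, "10".toList), ("nov".toList, "11".toList), ("dec".toList, "12".toList)]⟩

-- Source B's while loop: at index i it looks up the window s[i:i+3] and advances by 3 or 1;
-- ported on List Char (the current suffix), window = take 3.
def pvScan (table : PySem.Dict (List Char) (List Char)) (s : List Char) : List Char :=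
  match s with
  | [] => []
  | c :: t =>
    match table.get? (List.take 3 (c :: t)) with
    | some rep => rep ++ pvScan table (List.drop 3 (c :: t))
    | none => c :: pvScan table t
termination_by s.length
decreasing_by
  all_goals simp [List.length_drop]
  all_goals omega

def replace_month_day_py_alt (part_str : String) (part_index : Int) : String :=
  let s := PySem.Str.lower part_str
  if part_index = 4 then String.ofList (pvScan pvDayRepl s.toList)
  else if part_index = 3 then String.ofList (pvScan pvMonthRepl s.toList)
  else s

-- ===== PRECONDITION & SPEC =====
-- Pre_ excludes weekday fields whose lowercasing contains "satue" or "sathu": there A's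
-- sequential replaces let the later-starting "tue"/"thu" win over "sat" while a left-to-right
-- scan lets "sat" win — a tie on overlapping names that no one would specify either way.
def Pre_replace_month_day_py (part_str : String) (part_index : Int) : Prop :=
  part_index = 4 →
    (PySem.Str.isIn "satue" (PySem.Str.lower part_str) = false ∧
     PySem.Str.isIn "sathu" (PySem.Str.lower part_str) = false)
instance (part_str : String) (part_index : Int) : Decidable (Pre_replace_month_day_py part_str part_index) := by
  unfold Pre_replace_month_day_py; infer_instance

def pvWitness_replace_month_day_py : String × Int := ("Mon-Fri", 4)

def Spec_replace_month_day_py (part_str : String) (part_index : Int) (out : String) : Prop := out = replace_month_day_py_alt part_str part_index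
instance (part_str : String) (part_index : Int) (out : String) : Decidable (Spec_replace_month_day_py part_str part_index out) := by unfold Spec_replace_month_day_py; infer_instance

-- ===== CLAIM (what is proved, stated in full; the proofs are below) =====
def Claim_equal_replace_month_day_py : Prop := ∀ (part_str : String) (part_index : Int), Dom_replace_month_day_py part_str part_index → Pre_replace_month_day_py part_str part_index → Spec_replace_month_day_py part_str part_index (replace_month_day_py part_str part_index)

-- ===== LEMMAS AND PROOFS =====

-- Structural form of one str.replace pass (old ≠ []): scan left to right, on a match emit new
-- and jump over old, else copy one char.
def pvRepSpec (old new : List Char) (s : List Char) : List Char :=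
  match s with
  | [] => []
  | c :: t =>
    if old.isPrefixOf (c :: t) then new ++ pvRepSpec old new (List.drop (old.length - 1) t)
    else c :: pvRepSpec old new t
termination_by s.length
decreasing_by
  all_goals simp [List.length_drop]
  all_goals omega

-- the fold A performs: apply one replace pass per table entry, in order
def pvChain (table : List (List Char × List Char)) (s : List Char) : List Char :=
  table.foldl (fun acc p => pvRepSpec p.1 p.2 acc) s

def pvIsL (c : Char) : Bool := decide ('a' ≤ c ∧ c ≤ 'z')
def pvIsD (c : Char) : Bool := decide ('0' ≤ c ∧ c ≤ '9')

def pvGoodT (table : List (List Char × List Char)) : Prop :=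
  ∀ p ∈ table, p.1.length = 3 ∧ (∀ c ∈ p.1, pvIsL c = true) ∧ p.2 ≠ [] ∧ (∀ c ∈ p.2, pvIsD c = true)

lemma pvLD {c d : Char} (hc : pvIsL c = true) (hd : pvIsD d = true) : c ≠ d := by
  intro h; subst h
  simp only [pvIsL, pvIsD, decide_eq_true_eq, Char.le_def, UInt32.le_iff_toNat_le] at hc hd
  have : ('a' : Char).val.toNat = 97 := by decide
  have : ('9' : Char).val.toNat = 57 := by decide
  omega

-- PySem.Chars.replace (old ≠ []) is pvRepSpec
lemma pvGo (old new : List Char) (hold : old ≠ []) :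
    ∀ (fuel : Nat) (l acc : List Char), l.length ≤ fuel →
      PySem.Chars.replace.go old new fuel l acc = acc.reverse ++ pvRepSpec old new l := by
  intro fuel
  induction fuel with
  | zero =>
    intro l acc hl
    have : l = [] := List.eq_nil_of_length_eq_zero (Nat.le_zero.mp hl)
    subst this
    rw [PySem.Chars.replace.go, pvRepSpec]
    try simp
  | succ n ih =>
    intro l acc hl
    cases l with
    | nil =>
      rw [PySem.Chars.replace.go, pvRepSpec]
      try simp
      all_goals omega
    | cons c t =>
      rw [PySem.Chars.replace.go, pvRepSpec]
      by_cases hP : old.isPrefixOf (c :: t)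
      · simp only [hP, if_true]
        obtain ⟨o, os, rfl⟩ : ∃ o os, old = o :: os := by
          cases old with
          | nil => exact absurd rfl hold
          | cons o os => exact ⟨o, os, rfl⟩
        have hlen : (List.drop (o :: os).length (c :: t)).length ≤ n := by
          simp at hl ⊢; omega
        rw [ih _ _ hlen]
        simp [List.drop_succ_cons]
      · simp only [hP, if_false]
        rw [ih t (c :: acc) (by simpa using Nat.lt_succ_iff.mp (by simpa using hl))]
        simp
lemma pvReplace_eq (s old new : List Char) (hold : old ≠ []) :
    PySem.Chars.replace s old new = pvRepSpec old new s := by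
  rw [PySem.Chars.replace]
  rw [if_neg (by simpa using hold)]
  simpa using pvGo old new hold s.length s [] le_rfl
lemma pvRep_no (old new : List Char) (c : Char) (t : List Char) (h : ¬ old <+: (c :: t)) :
    pvRepSpec old new (c :: t) = c :: pvRepSpec old new t := by
  rw [pvRepSpec]
  simp [List.isPrefixOf_iff_prefix, h]

lemma pvRep_yes (old new : List Char) (s : List Char) (hold : old ≠ []) (h : old <+: s) :
    pvRepSpec old new s = new ++ pvRepSpec old new (List.drop old.length s) := by
  obtain ⟨o, os, rfl⟩ : ∃ o os, old = o :: os := by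
    cases old with
    | nil => exact absurd rfl hold
    | cons o os => exact ⟨o, os, rfl⟩
  cases s with
  | nil => exact absurd h (by simp)
  | cons c t =>
    rw [pvRepSpec, if_pos (List.isPrefixOf_iff_prefix.mpr h)]
    simp [List.drop_succ_cons]
-- a nonempty all-letter prefix of a replace output pulls back (replacements are digits)
lemma pvPull (k v : List Char) (hv : v ≠ []) (hvd : ∀ c ∈ v, pvIsD c = true) :
    ∀ (u p : List Char), (∀ c ∈ p, pvIsL c = true) → p <+: pvRepSpec k v u → p <+: u := by
  intro u
  induction u with
  | nil =>
    intro p _ hpre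
    rw [pvRepSpec] at hpre
    simpa using hpre
  | cons c t ih =>
    intro p hp hpre
    rw [pvRepSpec] at hpre
    by_cases hP : k.isPrefixOf (c :: t)
    · rw [if_pos hP] at hpre
      cases p with
      | nil => exact List.nil_prefix
      | cons a p' =>
        obtain ⟨d, v', rfl⟩ : ∃ d v', v = d :: v' := by
          cases v with
          | nil => exact absurd rfl hv
          | cons d v' => exact ⟨d, v', rfl⟩
        rw [List.cons_append, List.cons_prefix_cons] at hpre
        exact absurd hpre.1 (pvLD (hp a (by simp)) (hvd d (by simp)))
    · rw [if_neg hP] at hpre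
      cases p with
      | nil => exact List.nil_prefix
      | cons a p' =>
        rw [List.cons_prefix_cons] at hpre
        exact List.cons_prefix_cons.mpr
          ⟨hpre.1, ih p' (fun x hx => hp x (by simp [hx])) hpre.2⟩
lemma pvChain_nil (table : List (List Char × List Char)) : pvChain table [] = [] := by
  induction table with
  | nil => rfl
  | cons e rest ih => simpa [pvChain, pvRepSpec] using ih

lemma pvChain_nohead (c : Char) :
    ∀ (table : List (List Char × List Char)), pvGoodT table →
      ∀ t, (∀ p ∈ table, ¬ p.1 <+: (c :: t)) → pvChain table (c :: t) = c :: pvChain table t := by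
  intro table
  induction table with
  | nil => intro _ t _; rfl
  | cons e rest ih =>
    rintro hg t hno
    obtain ⟨k, v⟩ := e
    have hgk := hg (k, v) (by simp)
    have hrest : pvGoodT rest := fun p hp => hg p (by simp [hp])
    show pvChain rest (pvRepSpec k v (c :: t)) = c :: pvChain rest (pvRepSpec k v t)
    rw [pvRep_no k v c t (hno (k, v) (by simp))]
    apply ih hrest
    intro q hq hqpre
    have hgq := hg q (by simp [hq])
    obtain ⟨a0, a1, a2, hq1⟩ := List.length_eq_three.mp hgq.1
    rw [hq1, List.cons_prefix_cons] at hqpre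
    have hpull : [a1, a2] <+: t :=
      pvPull k v hgk.2.2.1 hgk.2.2.2 t [a1, a2]
        (fun x hx => hgq.2.1 x (by rw [hq1]; simpa using Or.inr hx)) hqpre.2
    exact hno q (by simp [hq])
      (by rw [hq1]; exact List.cons_prefix_cons.mpr ⟨hqpre.1, hpull⟩)
lemma pvRep_dig (k v : List Char) (hkl : ∀ c ∈ k, pvIsL c = true) (hk : k ≠ []) :
    ∀ (d : List Char), (∀ c ∈ d, pvIsD c = true) →
      ∀ w, pvRepSpec k v (d ++ w) = d ++ pvRepSpec k v w := by
  intro d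
  induction d with
  | nil => intro _ w; simp
  | cons c0 d' ih =>
    intro hd w
    obtain ⟨k0, ks, rfl⟩ : ∃ k0 ks, k = k0 :: ks := by
      cases k with
      | nil => exact absurd rfl hk
      | cons k0 ks => exact ⟨k0, ks, rfl⟩
    have hno : ¬ (k0 :: ks) <+: (c0 :: (d' ++ w)) := by
      intro hpre
      rw [List.cons_prefix_cons] at hpre
      exact absurd hpre.1 (pvLD (hkl k0 (by simp)) (hd c0 (by simp)))
    rw [List.cons_append, pvRep_no _ _ _ _ hno, ih (fun x hx => hd x (by simp [hx])) w]
    simp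
lemma pvChain_dig (d : List Char) (hd : ∀ c ∈ d, pvIsD c = true) :
    ∀ (table : List (List Char × List Char)), pvGoodT table →
      ∀ w, pvChain table (d ++ w) = d ++ pvChain table w := by
  intro table
  induction table with
  | nil => intro _ w; rfl
  | cons e rest ih =>
    rintro hg w
    obtain ⟨k, v⟩ := e
    have hgk := hg (k, v) (by simp)
    have hkne : k ≠ [] := by
      intro h; rw [h] at hgk; simpa using hgk.1
    show pvChain rest (pvRepSpec k v (d ++ w)) = d ++ pvChain rest (pvRepSpec k v w)
    rw [pvRep_dig k v hgk.2.1 hkne d hd w]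
    exact ih (fun p hp => hg p (by simp [hp])) _
lemma pvChain_skip3 (a b c : Char) :
    ∀ (table : List (List Char × List Char)), pvGoodT table →
      ∀ t, (∀ q ∈ table, ¬ q.1 <+: (a :: b :: c :: t) ∧ ¬ q.1 <+: (b :: c :: t) ∧ ¬ q.1 <+: (c :: t)) →
        pvChain table (a :: b :: c :: t) = a :: b :: c :: pvChain table t := by
  intro table
  induction table with
  | nil => intro _ t _; rfl
  | cons e rest ih =>
    rintro hg t hno
    obtain ⟨k, v⟩ := e
    have hgk := hg (k, v) (by simp)
    have hrest : pvGoodT rest := fun p hp => hg p (by simp [hp])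
    obtain ⟨h1, h2, h3⟩ := hno (k, v) (by simp)
    show pvChain rest (pvRepSpec k v (a :: b :: c :: t)) = a :: b :: c :: pvChain rest (pvRepSpec k v t)
    rw [pvRep_no _ _ _ _ h1, pvRep_no _ _ _ _ h2, pvRep_no _ _ _ _ h3]
    apply ih hrest
    intro q hq
    have hgq := hg q (by simp [hq])
    obtain ⟨a0, a1, a2, hq1⟩ := List.length_eq_three.mp hgq.1
    have hql : ∀ x ∈ [a0, a1, a2], pvIsL x = true := by rw [← hq1]; exact hgq.2.1
    obtain ⟨hn1, hn2, hn3⟩ := hno q (by simp [hq])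
    refine ⟨?_, ?_, ?_⟩
    · intro hpre
      apply hn1
      rw [hq1] at hpre ⊢
      simp only [List.cons_prefix_cons] at hpre ⊢
      exact ⟨hpre.1, hpre.2.1, hpre.2.2.1, List.nil_prefix⟩
    · intro hpre
      apply hn2
      rw [hq1] at hpre ⊢
      simp only [List.cons_prefix_cons] at hpre ⊢
      refine ⟨hpre.1, hpre.2.1, ?_⟩
      exact pvPull k v hgk.2.2.1 hgk.2.2.2 t [a2]
        (fun x hx => hql x (by simp at hx; simp [hx])) hpre.2.2
    · intro hpre
      apply hn3
      rw [hq1] at hpre ⊢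
      simp only [List.cons_prefix_cons] at hpre ⊢
      refine ⟨hpre.1, ?_⟩
      exact pvPull k v hgk.2.2.1 hgk.2.2.2 t [a1, a2]
        (fun x hx => hql x (by simp at hx; rcases hx with h | h <;> simp [h])) hpre.2
def pvOvl1 (k q : List Char) : Bool := List.take 2 q == List.drop 1 k
def pvOvl2 (k q : List Char) : Bool := List.take 1 q == List.drop 2 k

-- q an EARLIER table entry than mid: its pass must not fire overlapping a mid-occurrence
def pvR (s : List Char) (q mid : List Char × List Char) : Prop :=
  pvOvl1 mid.1 q.1 = false ∧ (pvOvl2 mid.1 q.1 = true → ¬ (mid.1 ++ List.drop 1 q.1) <:+: s)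

lemma pvR_mono {s s' : List Char} (hs : s' <:+ s) (q mid : List Char × List Char) :
    pvR s q mid → pvR s' q mid := by
  rintro ⟨h1, h2⟩
  exact ⟨h1, fun ho hin => h2 ho (hin.trans hs.isInfix)⟩

lemma pvChain_append (t1 t2 : List (List Char × List Char)) (s : List Char) :
    pvChain (t1 ++ t2) s = pvChain t2 (pvChain t1 s) := by
  simp [pvChain, List.foldl_append]

lemma pvChain_cons (k v : List Char) (rest : List (List Char × List Char)) (s : List Char) :
    pvChain ((k, v) :: rest) s = pvChain rest (pvRepSpec k v s) := rfl

lemma pvMain :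
    ∀ (n : Nat) (table : List (List Char × List Char)), pvGoodT table →
      ∀ (s : List Char), s.length ≤ n → List.Pairwise (pvR s) table →
        pvChain table s = pvScan ⟨table⟩ s := by
  intro n
  induction n with
  | zero =>
    intro table hg s hl _
    have hnil : s = [] := List.eq_nil_of_length_eq_zero (Nat.le_zero.mp hl)
    subst hnil
    rw [pvChain_nil, pvScan]
  | succ n ih =>
    intro table hg s hl hpair
    cases s with
    | nil => rw [pvChain_nil, pvScan]
    | cons c t =>
      rcases hfind : List.find? (fun p => p.1 == List.take 3 (c :: t)) table with _ | ⟨k, v⟩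
      · -- no table key matches at the head: both sides copy c
        have hno : ∀ p ∈ table, ¬ p.1 <+: (c :: t) := by
          intro p hp hpre
          have hne := List.find?_eq_none.mp hfind p hp
          apply hne
          simp only [beq_iff_eq]
          rw [List.prefix_iff_eq_take] at hpre
          rw [(hg p hp).1] at hpre
          exact hpre
        rw [pvChain_nohead c table hg t hno, pvScan]
        have hget : PySem.Dict.get? (⟨table⟩ : PySem.Dict (List Char) (List Char)) (List.take 3 (c :: t)) = none := by
          show Option.map (fun x => x.2) (List.find? (fun p => p.1 == List.take 3 (c :: t)) table) = none
          rw [hfind]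
          rfl
        rw [hget]
        rw [ih table hg t (by simpa using Nat.lt_succ_iff.mp (by simpa using hl))
          (hpair.imp (fun {q mid} => pvR_mono (List.suffix_cons c t) q mid))]
      · -- the first matching entry (k, v) fires, in A's chain and in B's scan alike
        obtain ⟨hbeq, pre, post, htab, hprev⟩ := List.find?_eq_some_iff_append.mp hfind
        have hkmem : (k, v) ∈ table := by rw [htab]; simp
        have hgk := hg (k, v) hkmem
        obtain ⟨k0, k1, k2, hkl⟩ := List.length_eq_three.mp hgk.1
        replace hkl : k = [k0, k1, k2] := hkl
        have hkeq : k = List.take 3 (c :: t) := by simpa using hbeq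
        have hkpre : k <+: (c :: t) := hkeq ▸ List.take_prefix 3 (c :: t)
        obtain ⟨r, hr⟩ := hkpre
        rw [hkl] at hr
        simp only [List.cons_append, List.cons.injEq] at hr
        obtain ⟨hc0, hr2⟩ := hr
        subst hc0
        subst hr2
        simp only [List.nil_append] at hfind hprev ⊢
        -- now the string is k0 :: k1 :: k2 :: r and k = [k0,k1,k2]
        have hgpre : pvGoodT pre := fun p hp => hg p (by rw [htab]; simp [hp])
        have hgpost : pvGoodT post := fun p hp => hg p (by rw [htab]; simp [hp])
        have hcross := (List.pairwise_append.mp (htab ▸ hpair)).2.2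
        have htriple : ∀ q ∈ pre, ¬ q.1 <+: (k0 :: k1 :: k2 :: r) ∧
            ¬ q.1 <+: (k1 :: k2 :: r) ∧ ¬ q.1 <+: (k2 :: r) := by
          intro q hq
          have hgq := hg q (by rw [htab]; simp [hq])
          obtain ⟨q0, q1, q2, hql⟩ := List.length_eq_three.mp hgq.1
          obtain ⟨hov1, hov2⟩ := hcross q hq (k, v) (by simp)
          refine ⟨?_, ?_, ?_⟩
          · intro hpre'
            have hne : q.1 ≠ List.take 3 (k0 :: k1 :: k2 :: r) := by
              simpa using hprev q hq
            apply hne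
            rw [List.prefix_iff_eq_take] at hpre'
            rw [hgq.1] at hpre'
            exact hpre'
          · intro hpre'
            rw [hql, List.cons_prefix_cons] at hpre'
            obtain ⟨rfl, hpre'⟩ := hpre'
            rw [List.cons_prefix_cons] at hpre'
            obtain ⟨rfl, _⟩ := hpre'
            rw [hkl, hql] at hov1
            simp [pvOvl1] at hov1
          · intro hpre'
            rw [hql, List.cons_prefix_cons] at hpre'
            obtain ⟨rfl, hpre'⟩ := hpre'
            have hov2' : pvOvl2 k (q.1) = true := by
              rw [hkl, hql]; simp [pvOvl2]
            apply hov2 hov2'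
            rw [hkl, hql]
            obtain ⟨r2, hr2⟩ := hpre'
            refine List.IsPrefix.isInfix ⟨r2, ?_⟩
            simp [← hr2]
        have hskip := pvChain_skip3 k0 k1 k2 pre hgpre r htriple
        have hXpre : k <+: (k0 :: k1 :: k2 :: pvChain pre r) := by
          rw [hkl]; exact ⟨pvChain pre r, rfl⟩
        have hkne : k ≠ [] := by rw [hkl]; simp
        have hchain : pvChain table (k0 :: k1 :: k2 :: r) =
            v ++ pvChain table r := by
          rw [htab, pvChain_append, pvChain_append, hskip, pvChain_cons, pvChain_cons]
          rw [pvRep_yes k v _ hkne hXpre]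
          have hdrop : List.drop k.length (k0 :: k1 :: k2 :: pvChain pre r) = pvChain pre r := by
            rw [hkl]; rfl
          rw [hdrop]
          exact pvChain_dig v hgk.2.2.2 post hgpost _
        have hget : PySem.Dict.get? (⟨table⟩ : PySem.Dict (List Char) (List Char))
            (List.take 3 (k0 :: k1 :: k2 :: r)) = some v := by
          show Option.map (fun x => x.2) (List.find? (fun p => p.1 == List.take 3 (k0 :: k1 :: k2 :: r)) table) = some v
          rw [hfind]
          rfl
        rw [hchain, pvScan, hget]
        have hlen : r.length ≤ n := by simp at hl; omega
        rw [ih table hg r hlen (hpair.imp (fun {q mid} =>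
          pvR_mono ⟨[k0, k1, k2], rfl⟩ q mid))]
        rfl
def pvGoodB (table : List (List Char × List Char)) : Bool :=
  table.all (fun p => p.1.length == 3 && p.1.all pvIsL && !p.2.isEmpty && p.2.all pvIsD)

lemma pvGoodB_imp (table : List (List Char × List Char)) (h : pvGoodB table = true) :
    pvGoodT table := by
  intro p hp
  simp only [pvGoodB, List.all_eq_true] at h
  obtain ⟨⟨⟨h1, h2⟩, h3⟩, h4⟩ := by simpa [Bool.and_eq_true] using h p hp
  refine ⟨by simpa using h1, fun c hc => by simpa using h2 c hc, by simpa using h3,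
    fun c hc => by simpa using h4 c hc⟩

lemma pvGood_day : pvGoodT pvDayRepl.items := pvGoodB_imp _ (by decide)
lemma pvGood_month : pvGoodT pvMonthRepl.items := pvGoodB_imp _ (by decide)

def pvRBm (q mid : List Char × List Char) : Bool := !(pvOvl1 mid.1 q.1) && !(pvOvl2 mid.1 q.1)
def pvRBd (q mid : List Char × List Char) : Bool :=
  !(pvOvl1 mid.1 q.1) &&
    (!(pvOvl2 mid.1 q.1) ||
      (mid.1 ++ List.drop 1 q.1 == "satue".toList || mid.1 ++ List.drop 1 q.1 == "sathu".toList))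

set_option maxRecDepth 100000 in
lemma pvPairB_month : List.Pairwise (fun q mid => pvRBm q mid = true) pvMonthRepl.items := by decide
set_option maxRecDepth 100000 in
lemma pvPairB_day : List.Pairwise (fun q mid => pvRBd q mid = true) pvDayRepl.items := by decide

lemma pvPair_month (s : List Char) : List.Pairwise (pvR s) pvMonthRepl.items := by
  refine pvPairB_month.imp ?_
  intro q mid h
  simp [pvRBm] at h
  exact ⟨h.1, fun ho => absurd ho (by simp [h.2])⟩

lemma pvPair_day (s : List Char) (h1 : ¬ "satue".toList <:+: s) (h2 : ¬ "sathu".toList <:+: s) :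
    List.Pairwise (pvR s) pvDayRepl.items := by
  refine pvPairB_day.imp ?_
  intro q mid h
  simp only [pvRBd, Bool.and_eq_true, Bool.or_eq_true, Bool.not_eq_true', beq_iff_eq] at h
  refine ⟨h.1, fun ho hin => ?_⟩
  rcases h.2 with h' | h' | h'
  · rw [ho] at h'; cases h'
  · rw [h'] at hin; exact h1 hin
  · rw [h'] at hin; exact h2 hin

-- ===== VERDICT (by name: the statement is the Claim_ definition above) =====
theorem replace_month_day_py_spec : Claim_equal_replace_month_day_py := by
  intro part_str part_index _ hpre
  unfold Spec_replace_month_day_py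
  by_cases h4 : part_index = 4
  · subst h4
    obtain ⟨hs1, hs2⟩ := hpre rfl
    rw [PySem.Str.isIn_eq, PySem.Str.toList_lower] at hs1 hs2
    have h1 := (PySem.Chars.isIn_eq_false_iff _ _).mp hs1
    have h2 := (PySem.Chars.isIn_eq_false_iff _ _).mp hs2
    apply String.toList_inj.mp
    simp only [replace_month_day_py, replace_month_day_py_alt, if_pos rfl,
      pvISODAYS, PySem.Dict.keys, List.map, PySem.List.enumerate, List.foldl]
    norm_num
    rw [show PySem.Int.toChars 0 = "0".toList from by decide,
        show PySem.Int.toChars 1 = "1".toList from by decide,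
        show PySem.Int.toChars 2 = "2".toList from by decide,
        show PySem.Int.toChars 3 = "3".toList from by decide,
        show PySem.Int.toChars 4 = "4".toList from by decide,
        show PySem.Int.toChars 5 = "5".toList from by decide,
        show PySem.Int.toChars 6 = "6".toList from by decide]
    rw [pvReplace_eq _ _ _ (by decide), pvReplace_eq _ _ _ (by decide),
        pvReplace_eq _ _ _ (by decide), pvReplace_eq _ _ _ (by decide),
        pvReplace_eq _ _ _ (by decide), pvReplace_eq _ _ _ (by decide),
        pvReplace_eq _ _ _ (by decide)]
    have hm := pvMain (PySem.Chars.lower part_str.toList).length pvDayRepl.items pvGood_day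
      (PySem.Chars.lower part_str.toList) le_rfl (pvPair_day _ h1 h2)
    simp only [pvChain, pvDayRepl, List.foldl] at hm
    exact hm
  · by_cases h3 : part_index = 3
    · subst h3
      apply String.toList_inj.mp
      simp only [replace_month_day_py, replace_month_day_py_alt, if_neg (by decide : ¬(3:Int) = 4),
        if_pos rfl, pvMONTHS, PySem.Dict.keys, List.map, PySem.List.enumerate, List.foldl]
      norm_num
      rw [show PySem.Int.toChars 1 = "1".toList from by decide,
          show PySem.Int.toChars 2 = "2".toList from by decide,
          show PySem.Int.toChars 3 = "3".toList from by decide,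
          show PySem.Int.toChars 4 = "4".toList from by decide,
          show PySem.Int.toChars 5 = "5".toList from by decide,
          show PySem.Int.toChars 6 = "6".toList from by decide,
          show PySem.Int.toChars 7 = "7".toList from by decide,
          show PySem.Int.toChars 8 = "8".toList from by decide,
          show PySem.Int.toChars 9 = "9".toList from by decide,
          show PySem.Int.toChars 10 = "10".toList from by decide,
          show PySem.Int.toChars 11 = "11".toList from by decide,
          show PySem.Int.toChars 12 = "12".toList from by decide]
      rw [pvReplace_eq _ _ _ (by decide), pvReplace_eq _ _ _ (by decide),
          pvReplace_eq _ _ _ (by decide), pvReplace_eq _ _ _ (by decide),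
          pvReplace_eq _ _ _ (by decide), pvReplace_eq _ _ _ (by decide),
          pvReplace_eq _ _ _ (by decide), pvReplace_eq _ _ _ (by decide),
          pvReplace_eq _ _ _ (by decide), pvReplace_eq _ _ _ (by decide),
          pvReplace_eq _ _ _ (by decide), pvReplace_eq _ _ _ (by decide)]
      have hm := pvMain (PySem.Chars.lower part_str.toList).length pvMonthRepl.items pvGood_month
        (PySem.Chars.lower part_str.toList) le_rfl (pvPair_month _)
      simp only [pvChain, pvMonthRepl, List.foldl] at hm
      exact hm
    · simp only [replace_month_day_py, replace_month_day_py_alt, if_neg h4, if_neg h3]
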